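-- pv_equiv track=rewrite | github.com/larryli/PuTTY | test/cryptsuite.py | fibonacci_scattered
-- ===== SOURCE A (Python) =====
-- def fibonacci_scattered(n=10):
--     # Generate a list of Fibonacci numbers with power-of-2 indices
--     # (F_1, F_2, F_4, ...), to be used as test inputs of varying
--     # sizes. Also put F_0 = 0 into the list as a bonus.
--     yield 0
--     a, b, c = 0, 1, 1
--     while True:
--         yield b
--         n -= 1
--         if n <= 0:
--             break
--         a, b, c = (a**2+b**2, b*(a+c), b**2+c**2)
-- ===== SOURCE B (Python) =====
-- def fibonacci_scattered(n=10):
--     # Yield F_0, then F_(2^k) for k = 0 .. max(n,1)-1, recomputing each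
--     # value from scratch with recursive fast doubling.
--     def fib_pair(m):
--         # returns (F_m, F_(m+1)) by fast doubling
--         if m == 0:
--             return (0, 1)
--         f, g = fib_pair(m // 2)
--         f2, g2 = f * (2 * g - f), f * f + g * g
--         if m % 2:
--             return (g2, f2 + g2)
--         return (f2, g2)
--     yield 0
--     idx = 1
--     for _ in range(max(n, 1)):
--         yield fib_pair(idx)[0]
--         idx *= 2
-- ===== Notes on version B (the rewrite author's own statement) =====
-- stated objective: alternative
-- what changed: B recomputes each power-of-2-index Fibonacci value from scratch with a recursive fast-doubling fib_pair helper and a simple doubling-index loop, instead of A's single pass maintaining the running (F_{k-1}, F_k, F_{k+1}) triple.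
import Mathlib
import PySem

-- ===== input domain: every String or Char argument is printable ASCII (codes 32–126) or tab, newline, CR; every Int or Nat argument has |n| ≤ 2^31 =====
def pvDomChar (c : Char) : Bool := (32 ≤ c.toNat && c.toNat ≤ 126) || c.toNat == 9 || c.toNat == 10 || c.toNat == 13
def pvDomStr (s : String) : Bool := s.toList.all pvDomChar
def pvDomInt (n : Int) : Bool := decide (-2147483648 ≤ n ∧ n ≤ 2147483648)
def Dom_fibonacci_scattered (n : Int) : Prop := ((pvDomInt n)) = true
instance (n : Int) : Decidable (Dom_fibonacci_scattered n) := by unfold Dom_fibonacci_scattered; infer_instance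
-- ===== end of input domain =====

-- B recomputes each power-of-2-index value from scratch by recursive fast doubling
-- instead of A's running (F_{k-1}, F_k, F_{k+1}) triple; alternative decomposition, same results.

-- ===== PORT A =====
-- A's while-True loop: yield b, decrement n, break when n ≤ 0, else update the triple.
def fibLoopA (a b c : Int) (n : Int) : List Int :=
  if h : n - 1 ≤ 0 then [b]
  else b :: fibLoopA (a ^ 2 + b ^ 2) (b * (a + c)) (b ^ 2 + c ^ 2) (n - 1)
termination_by n.toNat
decreasing_by omega

def fibonacci_scattered (n : Int) : List Int :=
  0 :: fibLoopA 0 1 1 n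

-- ===== PORT B =====
-- recursive fast doubling: fibPair m = (F_m, F_{m+1})
def fibPair (m : Nat) : Int × Int :=
  if h : m = 0 then (0, 1)
  else
    let p := fibPair (m / 2)
    let f := p.1
    let g := p.2
    let f2 := f * (2 * g - f)
    let g2 := f * f + g * g
    if m % 2 = 1 then (g2, f2 + g2) else (f2, g2)
termination_by m
decreasing_by exact Nat.div_lt_self (Nat.pos_of_ne_zero h) (by norm_num)

-- the generator's for-loop over range(max(n,1)) with the doubling index
def fibLoopB (k : Nat) (idx : Nat) : List Int :=
  match k with
  | 0 => []
  | k + 1 => (fibPair idx).1 :: fibLoopB k (idx * 2)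

def fibonacci_scattered_alt (n : Int) : List Int :=
  0 :: fibLoopB (max n 1).toNat 1

-- ===== PRECONDITION & SPEC =====
def Spec_fibonacci_scattered (n : Int) (out : List Int) : Prop := out = fibonacci_scattered_alt n
instance (n : Int) (out : List Int) : Decidable (Spec_fibonacci_scattered n out) := by unfold Spec_fibonacci_scattered; infer_instance

-- ===== CLAIM (what is proved, stated in full; the proofs are below) =====
def Claim_equal_fibonacci_scattered : Prop := ∀ (n : Int), Dom_fibonacci_scattered n → Spec_fibonacci_scattered n (fibonacci_scattered n)

-- ===== LEMMAS AND PROOFS =====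

lemma fibPair_eq (m : Nat) : fibPair m = ((Nat.fib m : Int), (Nat.fib (m + 1) : Int)) := by
  induction m using Nat.strong_induction_on with
  | _ m ih =>
    rw [fibPair]
    by_cases h : m = 0
    · simp [h]
    · have ih2 := ih (m / 2) (Nat.div_lt_self (Nat.pos_of_ne_zero h) (by norm_num))
      rw [dif_neg h, ih2]
      dsimp only
      have hle : Nat.fib (m / 2) ≤ 2 * Nat.fib (m / 2 + 1) :=
        le_trans (Nat.fib_le_fib_succ) (by omega)
      have hq1 : (Nat.fib (m / 2) : Int) * (2 * (Nat.fib (m / 2 + 1) : Int) - (Nat.fib (m / 2) : Int))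
          = (Nat.fib (2 * (m / 2)) : Int) := by
        have hb := Nat.fib_two_mul (m / 2)
        zify [hle] at hb
        linarith [hb]
      have hq2 : (Nat.fib (m / 2) : Int) * (Nat.fib (m / 2) : Int) + (Nat.fib (m / 2 + 1) : Int) * (Nat.fib (m / 2 + 1) : Int)
          = (Nat.fib (2 * (m / 2) + 1) : Int) := by
        have hb := Nat.fib_two_mul_add_one (m / 2)
        have hb' : (Nat.fib (2 * (m / 2) + 1) : Int)
            = (Nat.fib (m / 2 + 1) : Int) ^ 2 + (Nat.fib (m / 2) : Int) ^ 2 := by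
          exact_mod_cast congrArg (Nat.cast : Nat → Int) hb
        rw [hb']; ring
      by_cases hp : m % 2 = 1
      · have hm : 2 * (m / 2) + 1 = m := by omega
        rw [if_pos hp, Prod.mk.injEq]
        refine ⟨?_, ?_⟩
        · conv_rhs => rw [← hm]
          exact hq2
        · have hm1 : m + 1 = 2 * (m / 2) + 2 := by omega
          rw [hm1]
          have hadd : (Nat.fib (2 * (m / 2) + 2) : Int)
              = (Nat.fib (2 * (m / 2)) : Int) + (Nat.fib (2 * (m / 2) + 1) : Int) := by
            exact_mod_cast congrArg (Nat.cast : Nat → Int) (Nat.fib_add_two (n := 2 * (m / 2)))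
          rw [hadd, ← hq1, ← hq2]
      · have hm : 2 * (m / 2) = m := by omega
        rw [if_neg hp, Prod.mk.injEq]
        refine ⟨?_, ?_⟩
        · conv_rhs => rw [← hm]
          exact hq1
        · have hm1 : m + 1 = 2 * (m / 2) + 1 := by omega
          rw [hm1]; exact hq2

lemma fib_stepN (j : Nat) :
    (Nat.fib j ^ 2 + Nat.fib (j + 1) ^ 2 = Nat.fib (2 * j + 1))
    ∧ (Nat.fib (j + 1) * (Nat.fib j + Nat.fib (j + 2)) = Nat.fib (2 * j + 2))
    ∧ (Nat.fib (j + 1) ^ 2 + Nat.fib (j + 2) ^ 2 = Nat.fib (2 * j + 3)) := by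
  have e2 : j + 1 + 1 = j + 2 := by omega
  refine ⟨?_, ?_, ?_⟩
  · conv_rhs => rw [show 2 * j + 1 = j + j + 1 by ring, Nat.fib_add]
    ring
  · conv_rhs => rw [show 2 * j + 2 = j + (j + 1) + 1 by ring, Nat.fib_add]
    simp only [e2]; ring
  · conv_rhs => rw [show 2 * j + 3 = (j + 1) + (j + 1) + 1 by ring, Nat.fib_add]
    simp only [e2]; ring

lemma fib_step (j : Nat) :
    ((Nat.fib j : Int) ^ 2 + (Nat.fib (j + 1) : Int) ^ 2 = (Nat.fib (2 * j + 1) : Int))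
    ∧ ((Nat.fib (j + 1) : Int) * ((Nat.fib j : Int) + (Nat.fib (j + 2) : Int)) = (Nat.fib (2 * j + 2) : Int))
    ∧ ((Nat.fib (j + 1) : Int) ^ 2 + (Nat.fib (j + 2) : Int) ^ 2 = (Nat.fib (2 * j + 3) : Int)) := by
  obtain ⟨i1, i2, i3⟩ := fib_stepN j
  refine ⟨by exact_mod_cast congrArg (Nat.cast : Nat → Int) i1,
          by exact_mod_cast congrArg (Nat.cast : Nat → Int) i2,
          by exact_mod_cast congrArg (Nat.cast : Nat → Int) i3⟩

lemma loopA_eq (k : Nat) : ∀ (n : Int) (j : Nat), (max n 1).toNat = k →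
    fibLoopA (Nat.fib j) (Nat.fib (j + 1)) (Nat.fib (j + 2)) n = fibLoopB k (j + 1) := by
  induction k with
  | zero => intro n j hk; omega
  | succ k ih =>
    intro n j hk
    rw [fibLoopA]
    by_cases h : n - 1 ≤ 0
    · have hk0 : k = 0 := by omega
      simp [h, hk0, fibLoopB, fibPair_eq]
    · rw [dif_neg h]
      obtain ⟨h1, h2, h3⟩ := fib_step j
      rw [h1, h2, h3]
      have hrec := ih (n - 1) (2 * j + 1) (by omega)
      have e1 : 2 * j + 1 + 1 = 2 * j + 2 := by ring
      have e2 : 2 * j + 1 + 2 = 2 * j + 3 := by ring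
      rw [e1, e2] at hrec
      rw [hrec]
      have e3 : 2 * j + 1 + 1 = (j + 1) * 2 := by ring
      simp [fibLoopB, fibPair_eq, e3]

-- ===== VERDICT (by name: the statement is the Claim_ definition above) =====
theorem fibonacci_scattered_spec : Claim_equal_fibonacci_scattered := by
  intro n _
  unfold Spec_fibonacci_scattered fibonacci_scattered fibonacci_scattered_alt
  have := loopA_eq (max n 1).toNat n 0 rfl
  simpa using this
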